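-- pv_equiv track=rewrite | github.com/collinsakenga/codewars_solutions | 6 kyu/Adjacent repeated words in a string.py | count_adjacent_pairs
-- ===== SOURCE A (Python) =====
-- def count_adjacent_pairs(st):
--     st=st.lower().split()
--     total=0
--     i=0
--     while True:
--         if i>len(st)-2:
--             break
--         if st[i]==st[i+1]:
--             total+=1
--             while True:
--                 i+=1
--                 if i>len(st)-2 or st[i]!=st[i+1]:
--                     break
--         i+=1
--     return total
-- ===== SOURCE B (Python) =====
-- def count_adjacent_pairs(st):
--     w = st.lower().split()
--     return sum(1 for i in range(len(w) - 1)
--                if w[i] == w[i + 1] and (i == 0 or w[i - 1] != w[i]))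
-- ===== Notes on version B (the rewrite author's own statement) =====
-- stated objective: simpler
-- what changed: Replaces A's index cursor with nested run-skipping while-loops by a single comprehension that counts run-start positions: indices i with w[i]==w[i+1] and no equal word just before.
import Mathlib
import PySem

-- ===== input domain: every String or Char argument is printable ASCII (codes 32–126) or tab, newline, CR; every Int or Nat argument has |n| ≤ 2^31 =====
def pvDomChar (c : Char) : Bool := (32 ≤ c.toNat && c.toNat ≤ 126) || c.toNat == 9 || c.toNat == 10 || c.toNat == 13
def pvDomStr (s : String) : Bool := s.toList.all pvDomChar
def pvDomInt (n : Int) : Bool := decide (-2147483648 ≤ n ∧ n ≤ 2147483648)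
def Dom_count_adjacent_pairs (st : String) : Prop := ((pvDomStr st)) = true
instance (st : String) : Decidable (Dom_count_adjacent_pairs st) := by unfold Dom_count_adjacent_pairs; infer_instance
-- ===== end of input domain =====

-- B replaces A's index cursor with nested run-skipping while-loops by a single
-- comprehension counting run-start positions (objective: simpler; same O(n) cost).

-- ===== PORT A =====
-- Inner `while True: i+=1; if i>len(st)-2 or st[i]!=st[i+1]: break` of A; with j := i+1
-- already substituted, `j > len-2` is `j+2 > len`, i.e. `i+3 > len`. All Python list
-- accesses are guarded in range by the conditions, so `getD _ ""` is exact here.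
def skipRunA (ws : List String) (i : Nat) : Nat :=
  if i + 3 > ws.length ∨ ws.getD (i+1) "" ≠ ws.getD (i+2) "" then i + 1
  else skipRunA ws (i+1)
termination_by ws.length - i
decreasing_by omega

-- The inner loop always advances the cursor (cited by loopA's termination proof).
theorem skipRunA_ge (ws : List String) (i : Nat) : i + 1 ≤ skipRunA ws i := by
  unfold skipRunA
  split
  · exact le_refl _
  · have h := skipRunA_ge ws (i+1)
    omega
termination_by ws.length - i
decreasing_by omega

-- Outer `while True:` loop of A, carrying the cursor i and the running total.
def loopA (ws : List String) (i : Nat) (total : Int) : Int :=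
  if i + 2 > ws.length then total
  else if ws.getD i "" = ws.getD (i+1) "" then
    loopA ws (skipRunA ws i + 1) (total + 1)
  else loopA ws (i + 1) total
termination_by ws.length - i
decreasing_by
  · have h := skipRunA_ge ws i; omega
  · omega

def count_adjacent_pairs (st : String) : Int :=
  loopA (PySem.Str.split₀ (PySem.Str.lower st)) 0 0

-- ===== PORT B =====
-- Source B: sum(1 for i in range(len(w)-1) if w[i]==w[i+1] and (i==0 or w[i-1]!=w[i]))
def count_adjacent_pairs_alt (st : String) : Int :=
  let w := PySem.Str.split₀ (PySem.Str.lower st)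
  (List.range (w.length - 1)).foldl
    (fun t i => if w.getD i "" = w.getD (i+1) "" ∧ (i = 0 ∨ w.getD (i-1) "" ≠ w.getD i "") then t + 1 else t)
    0

-- ===== PRECONDITION & SPEC =====
def Spec_count_adjacent_pairs (st : String) (out : Int) : Prop := out = count_adjacent_pairs_alt st
instance (st : String) (out : Int) : Decidable (Spec_count_adjacent_pairs st out) := by unfold Spec_count_adjacent_pairs; infer_instance

-- ===== CLAIM (what is proved, stated in full; the proofs are below) =====
def Claim_equal_count_adjacent_pairs : Prop := ∀ (st : String), Dom_count_adjacent_pairs st → Spec_count_adjacent_pairs st (count_adjacent_pairs st)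

-- ===== LEMMAS AND PROOFS =====

-- B's run-start predicate, as a Bool test on an index.
def runStart (ws : List String) (i : Nat) : Bool :=
  decide (ws.getD i "" = ws.getD (i+1) "" ∧ (i = 0 ∨ ws.getD (i-1) "" ≠ ws.getD i ""))

-- skipRunA stops exactly at the first failure of the pair condition.
theorem skipRunA_stop (ws : List String) (i : Nat) :
    ws.length < skipRunA ws i + 2 ∨ ws.getD (skipRunA ws i) "" ≠ ws.getD (skipRunA ws i + 1) "" := by
  unfold skipRunA
  split
  · rename_i h
    rcases h with h | h
    · left; omega
    · right; exact h
  · exact skipRunA_stop ws (i+1)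
termination_by ws.length - i
decreasing_by omega

-- Every pair strictly before the stop point is an equal pair.
theorem skipRunA_run (ws : List String) (i : Nat) :
    ∀ j, i + 1 ≤ j → j < skipRunA ws i → ws.getD j "" = ws.getD (j+1) "" := by
  unfold skipRunA
  split
  · intro j hj hj'; omega
  · next h =>
    push Not at h
    intro j hj hj'
    rcases Nat.eq_or_lt_of_le hj with rfl | hlt
    · exact h.2
    · exact skipRunA_run ws (i+1) j hlt hj'
termination_by ws.length - i
decreasing_by omega

-- Dropping a prefix of indices on which the predicate is false does not change the count.
theorem countP_range'_cut (p : Nat → Bool) :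
    ∀ (d a c : Nat), (∀ j, a ≤ j → j < a + d → j < c → p j = false) →
      (List.range' a (c - a)).countP p = (List.range' (a + d) (c - (a + d))).countP p := by
  intro d
  induction d with
  | zero => intro a c _; rfl
  | succ d ih =>
    intro a c hfalse
    by_cases hac : a < c
    · have h1 : c - a = (c - (a+1)) + 1 := by omega
      rw [h1, List.range'_succ, List.countP_cons, hfalse a (le_refl _) (by omega) hac]
      have := ih (a+1) c (fun j h1 h2 h3 => hfalse j (by omega) (by omega) h3)
      simpa [Nat.add_assoc, Nat.add_comm 1 d] using this
    · have h1 : c - a = 0 := by omega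
      have h2 : c - (a + (d+1)) = 0 := by omega
      rw [h1, h2]
      simp

-- Main invariant: from any cursor position that is not strictly inside a run,
-- A's outer loop adds exactly the number of run-start indices ≥ i.
theorem loopA_eq (ws : List String) :
    ∀ (m i : Nat) (total : Int), ws.length - i ≤ m →
      (i = 0 ∨ ws.length ≤ i ∨ ws.getD (i-1) "" ≠ ws.getD i "") →
      loopA ws i total = total + ((List.range' i (ws.length - 1 - i)).countP (runStart ws) : Int) := by
  intro m
  induction m with
  | zero =>
    intro i total hm hb
    have hlen : ws.length ≤ i := by omega
    rw [loopA]
    have h1 : ws.length - 1 - i = 0 := by omega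
    simp [h1, if_pos (by omega : i + 2 > ws.length)]
  | succ m ih =>
    intro i total hm hb
    rw [loopA]
    by_cases hend : i + 2 > ws.length
    · have h1 : ws.length - 1 - i = 0 := by omega
      simp [h1, if_pos hend]
    · rw [if_neg hend]
      push Not at hend
      have hcons : ws.length - 1 - i = (ws.length - 1 - (i+1)) + 1 := by omega
      by_cases heq : ws.getD i "" = ws.getD (i+1) ""
      · rw [if_pos heq]
        set s := skipRunA ws i with hs
        have hsge : i + 1 ≤ s := skipRunA_ge ws i
        -- boundary condition at the new cursor s+1
        have hb' : s + 1 = 0 ∨ ws.length ≤ s + 1 ∨ ws.getD s "" ≠ ws.getD (s+1) "" := by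
          rcases skipRunA_stop ws i with h | h
          · right; left; omega
          · right; right; exact h
        rw [ih (s+1) (total+1) (by omega) hb']
        -- run start at i counts 1
        have hstart : runStart ws i = true := by
          have : i = 0 ∨ ws.getD (i-1) "" ≠ ws.getD i "" := by
            rcases hb with h | h | h
            · left; exact h
            · omega
            · right; exact h
          unfold runStart
          rw [decide_eq_true_eq]
          exact ⟨heq, this⟩
        -- indices i+1 .. s are not run starts
        have hfalse : ∀ j, i + 1 ≤ j → j < (i+1) + (s - i) → j < ws.length - 1 → runStart ws j = false := by
          intro j h1 h2 _
          have hrun : ws.getD (j-1) "" = ws.getD j "" := by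
            rcases Nat.eq_or_lt_of_le h1 with rfl | hlt
            · simpa using heq
            · have := skipRunA_run ws i (j-1) (by omega) (by omega)
              have hj : j - 1 + 1 = j := by omega
              rwa [hj] at this
          unfold runStart
          simp only [decide_eq_false_iff_not]
          rintro ⟨-, h2⟩
          rcases h2 with h2 | h2
          · omega
          · exact h2 hrun
        have hcut := countP_range'_cut (runStart ws) (s - i) (i+1) (ws.length - 1) hfalse
        have hsi : i + 1 + (s - i) = s + 1 := by omega
        rw [hsi] at hcut
        rw [hcons, List.range'_succ, List.countP_cons, hstart, hcut]
        push_cast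
        simp
        omega
      · rw [if_neg heq]
        rw [ih (i+1) total (by omega) (by right; right; simpa using heq)]
        have hfail : runStart ws i = false := by
          unfold runStart
          simp only [decide_eq_false_iff_not]
          rintro ⟨h1, -⟩
          exact heq h1
        rw [hcons, List.range'_succ, List.countP_cons, hfail]
        simp

-- ===== VERDICT (by name: the statement is the Claim_ definition above) =====
theorem count_adjacent_pairs_spec : Claim_equal_count_adjacent_pairs := by
  intro st _
  unfold Spec_count_adjacent_pairs count_adjacent_pairs count_adjacent_pairs_alt
  set w := PySem.Str.split₀ (PySem.Str.lower st) with hw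
  rw [PySem.List.foldl_ite_add_one]
  rw [loopA_eq w (w.length) 0 0 (by omega) (Or.inl rfl)]
  rw [List.range_eq_range']
  unfold runStart
  norm_num
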